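-- pv_equiv track=rewrite | github.com/thienphung00/mode-watermarking-v2 | mode-watermarking/scripts/extract_coco_captions.py | extract_captions
-- ===== SOURCE A (Python) =====
-- def extract_captions(annotations):
--     """Extract captions from COCO annotations."""
--     # Build image_id to captions mapping
--     image_to_captions = {}
--     for ann in annotations['annotations']:
--         image_id = ann['image_id']
--         caption = ann['caption']
--         if image_id not in image_to_captions:
--             image_to_captions[image_id] = []
--         image_to_captions[image_id].append(caption)
--
--     # Extract one caption per image (first one)
--     captions = []
--     for image_id in sorted(image_to_captions.keys()):
--         captions.append(image_to_captions[image_id][0])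
--
--     return captions
-- ===== SOURCE B (Python) =====
-- def extract_captions(annotations):
--     """Extract captions from COCO annotations."""
--     # Stable-sort all (image_id, caption) records by image_id, then one grouping
--     # pass over the sorted records: emit the caption whenever the image_id differs
--     # from the previous record's.  Stability means the first record of each run is
--     # the first-seen caption for that image_id, and the runs come out id-sorted.
--     pairs = sorted(
--         [(ann['image_id'], ann['caption']) for ann in annotations['annotations']],
--         key=lambda p: p[0],
--     )
--     captions = []
--     prev = None
--     for image_id, caption in pairs:
--         if prev is None or image_id != prev:
--             captions.append(caption)
--         prev = image_id
--     return captions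
-- ===== Notes on version B (the rewrite author's own statement) =====
-- stated objective: alternative
-- what changed: A groups every caption into a dict of lists and then walks the sorted keys with dict lookups; B instead stable-sorts the full record list by image_id and makes a single grouping pass that emits the caption whenever the image_id changes from the previous record, so no dict or per-key lists are built at all.
import Mathlib
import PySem

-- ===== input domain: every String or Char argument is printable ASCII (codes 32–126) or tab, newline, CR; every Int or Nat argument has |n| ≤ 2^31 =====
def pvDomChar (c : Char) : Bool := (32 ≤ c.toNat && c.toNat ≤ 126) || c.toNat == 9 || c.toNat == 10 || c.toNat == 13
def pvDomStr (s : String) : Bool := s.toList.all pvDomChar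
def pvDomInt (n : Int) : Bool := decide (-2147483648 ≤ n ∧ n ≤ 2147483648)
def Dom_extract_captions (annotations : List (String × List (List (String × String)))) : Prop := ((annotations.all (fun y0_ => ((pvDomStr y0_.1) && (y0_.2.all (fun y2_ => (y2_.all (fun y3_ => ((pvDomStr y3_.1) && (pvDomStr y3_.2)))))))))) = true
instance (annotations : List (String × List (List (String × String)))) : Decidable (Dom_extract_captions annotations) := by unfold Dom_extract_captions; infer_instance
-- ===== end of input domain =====

-- B stable-sorts the (image_id, caption) records by image_id and takes the first record of
-- each run of equal ids in one grouping pass, instead of A's dict of caption lists iterated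
-- over its sorted keys.  Both ports use first-match association-list lookup for dict access.

-- ===== PORT A =====
-- ann['image_id'] / ann['caption'] / annotations['annotations']; missing keys (KeyError) are
-- excluded by Pre_, the port substitutes a default there.
def aGetS (d : List (String × String)) (k : String) : String := (List.lookup k d).getD ""

def extract_captions (annotations : List (String × List (List (String × String)))) : List String :=
  let recs := (List.lookup "annotations" annotations).getD []
  -- for ann in …: if image_id not in d: d[image_id] = [];  d[image_id].append(caption)
  let d := recs.foldl
    (fun (d : PySem.Dict String (List String)) ann =>
      (d.setdefault (aGetS ann "image_id") []).modify (aGetS ann "image_id") [] (· ++ [aGetS ann "caption"]))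
    PySem.Dict.empty
  -- for image_id in sorted(d.keys()): captions.append(d[image_id][0])
  (PySem.List.sorted d.keys (fun k => k) false).foldl
    (fun acc k => acc ++ [(d.getD k []).headD ""]) []

-- ===== PORT B =====
def extract_captions_alt (annotations : List (String × List (List (String × String)))) : List String :=
  let recs := (List.lookup "annotations" annotations).getD []
  -- pairs = sorted([(ann['image_id'], ann['caption']) for ann in …], key=lambda p: p[0])
  let pairs := PySem.List.sorted
    (recs.map (fun ann => (aGetS ann "image_id", aGetS ann "caption"))) (fun p => p.1) false
  -- for image_id, caption in pairs: if prev is None or image_id != prev: captions.append(caption); prev = image_id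
  (pairs.foldl
    (fun (st : Option String × List String) p =>
      (some p.1, if st.1 ≠ some p.1 then st.2 ++ [p.2] else st.2))
    (none, [])).2

-- ===== PRECONDITION & SPEC =====
-- Pre_ excludes exactly the inputs on which the Python A raises KeyError: a missing
-- 'annotations' key, or a record missing 'image_id' or 'caption'.
def Pre_extract_captions (annotations : List (String × List (List (String × String)))) : Prop :=
  (List.lookup "annotations" annotations).isSome = true ∧
  ∀ ann ∈ (List.lookup "annotations" annotations).getD [],
    (List.lookup "image_id" ann).isSome = true ∧ (List.lookup "caption" ann).isSome = true
instance (annotations : List (String × List (List (String × String)))) : Decidable (Pre_extract_captions annotations) := by unfold Pre_extract_captions; infer_instance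

def pvWitness_extract_captions : (List (String × List (List (String × String)))) :=
  [("annotations", [[("image_id", "7"), ("caption", "a cat")],
                    [("image_id", "3"), ("caption", "a dog")],
                    [("image_id", "7"), ("caption", "another cat")]])]

def Spec_extract_captions (annotations : List (String × List (List (String × String)))) (out : List String) : Prop := out = extract_captions_alt annotations
instance (annotations : List (String × List (List (String × String)))) (out : List String) : Decidable (Spec_extract_captions annotations out) := by unfold Spec_extract_captions; infer_instance

-- ===== CLAIM (what is proved, stated in full; the proofs are below) =====
def Claim_equal_extract_captions : Prop := ∀ (annotations : List (String × List (List (String × String)))), Dom_extract_captions annotations → Pre_extract_captions annotations → Spec_extract_captions annotations (extract_captions annotations)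

-- ===== LEMMAS AND PROOFS =====

theorem setdefault_modify (d : PySem.Dict String (List String)) (k : String) (f : List String → List String) :
    (d.setdefault k []).modify k [] f = d.modify k [] f := by
  by_cases h : d.contains k = true
  · rw [PySem.Dict.setdefault_of_contains _ _ h]
  · rw [PySem.Dict.setdefault_of_not_contains _ _ (by simpa using h)]
    simp [PySem.Dict.modify, PySem.Dict.getD_insert_self, PySem.Dict.insert_insert_self,
      PySem.Dict.getD_of_not_contains _ _ (by simpa using h)]

def pvPairs (recs : List (List (String × String))) : List (String × String) :=
  recs.map (fun a => (aGetS a "image_id", aGetS a "caption"))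

-- first caption recorded for key k in the pair list S
def pvFirstCap (S : List (String × String)) (k : String) : String :=
  ((S.filter (fun p => p.1 == k)).map (·.2)).headD ""

def pvF (recs : List (List (String × String))) (k : String) : String :=
  pvFirstCap (pvPairs recs) k

def pvK (recs : List (List (String × String))) : PySem.Set String :=
  PySem.Set.ofList (recs.map (fun a => aGetS a "image_id"))

theorem A_eq (annotations : List (String × List (List (String × String)))) :
    extract_captions annotations
    = (PySem.List.sorted (pvK ((List.lookup "annotations" annotations).getD [])) (fun k => k) false).map
        (pvF ((List.lookup "annotations" annotations).getD [])) := by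
  simp only [extract_captions]
  set recs := (List.lookup "annotations" annotations).getD [] with hrecs
  have hd : recs.foldl (fun (d : PySem.Dict String (List String)) ann =>
        (d.setdefault (aGetS ann "image_id") []).modify (aGetS ann "image_id") [] (· ++ [aGetS ann "caption"]))
        PySem.Dict.empty
      = recs.foldl (fun (d : PySem.Dict String (List String)) ann =>
        d.modify (aGetS ann "image_id") [] (fun x => x ++ [aGetS ann "caption"])) PySem.Dict.empty :=
    PySem.List.foldl_congr_mem recs _ _ _ (fun acc x _ => setdefault_modify acc (aGetS x "image_id") _)
  rw [hd]
  have hkeys : (recs.foldl (fun (d : PySem.Dict String (List String)) ann =>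
        d.modify (aGetS ann "image_id") [] (fun x => x ++ [aGetS ann "caption"])) PySem.Dict.empty).keys
      = pvK recs := by
    rw [PySem.Dict.keys_foldl_modify_key recs (fun ann => aGetS ann "image_id") []
        (fun _ ann => (fun x => x ++ [aGetS ann "caption"])) PySem.Dict.empty]
    simp [pvK, PySem.Set.update_nil_left, PySem.Dict.keys_empty]
  have hgetD : ∀ c, (recs.foldl (fun (d : PySem.Dict String (List String)) ann =>
        d.modify (aGetS ann "image_id") [] (fun x => x ++ [aGetS ann "caption"])) PySem.Dict.empty).getD c []
      = ((pvPairs recs).filter (fun p => p.1 == c)).map (·.2) := by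
    intro c
    have h := PySem.Dict.getD_foldl_modify_append (pvPairs recs) PySem.Dict.empty c
    simpa [pvPairs, List.foldl_map, PySem.Dict.getD_empty] using h
  rw [hkeys, PySem.List.foldl_append_singleton_eq_map]
  simp only [List.nil_append]
  apply List.map_congr_left
  intro k _
  rw [hgetD k]
  rfl

-- the grouping pass of B, as a structural recursion on the sorted pair list
def pvGrp (prev : Option String) (S : List (String × String)) : List String :=
  match S with
  | [] => []
  | p :: t => if prev ≠ some p.1 then p.2 :: pvGrp (some p.1) t else pvGrp (some p.1) t

theorem foldl_grp (S : List (String × String)) :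
    ∀ (prev : Option String) (acc : List String),
    (S.foldl (fun (st : Option String × List String) p =>
        (some p.1, if st.1 ≠ some p.1 then st.2 ++ [p.2] else st.2)) (prev, acc)).2
    = acc ++ pvGrp prev S := by
  induction S with
  | nil => intro prev acc; simp [pvGrp]
  | cons p t ih =>
    intro prev acc
    rw [List.foldl_cons, ih]
    by_cases h : prev = some p.1
    · simp [pvGrp, h]
    · simp [pvGrp, h]

-- stability of PySem.List.sorted: one insertion step, seen through a key filter
theorem filter_insertBy (ys : List (String × String)) (x : String × String) (k : String)
    (hys : ys.Pairwise (fun a b => a.1 ≤ b.1)) :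
    (PySem.List.insertBy (fun a b => decide (a.1 < b.1)) x ys).filter (fun p => p.1 == k)
    = ys.filter (fun p => p.1 == k) ++ (if x.1 == k then [x] else []) := by
  induction ys with
  | nil => simp [PySem.List.insertBy]; split_ifs <;> simp_all
  | cons y ys ih =>
    rw [List.pairwise_cons] at hys
    by_cases hlt : x.1 < y.1
    · have hins : PySem.List.insertBy (fun a b => decide (a.1 < b.1)) x (y :: ys) = x :: y :: ys := by
        simp [PySem.List.insertBy, hlt]
      rw [hins]
      by_cases hk : x.1 = k
      · have hnil : (y :: ys).filter (fun p => p.1 == k) = [] := by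
          rw [List.filter_eq_nil_iff]
          intro a ha
          have hya : y.1 ≤ a.1 := by
            rcases List.mem_cons.mp ha with h | h
            · exact h ▸ le_refl _
            · exact hys.1 a h
          have : k < a.1 := lt_of_lt_of_le (hk ▸ hlt) hya
          simp [ne_of_gt this]
        rw [List.filter_cons]
        simp [hk, hnil]
      · rw [List.filter_cons]
        simp [hk]
    · have hins : PySem.List.insertBy (fun a b => decide (a.1 < b.1)) x (y :: ys)
          = y :: PySem.List.insertBy (fun a b => decide (a.1 < b.1)) x ys := by
        simp [PySem.List.insertBy, hlt]
      rw [hins, List.filter_cons, List.filter_cons, ih hys.2]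
      by_cases hy : (y.1 == k) = true <;> simp [hy]

-- stability of PySem.List.sorted: the records with key k keep their original order
theorem filter_sorted_key (ps : List (String × String)) (k : String) :
    (PySem.List.sorted ps (fun p => p.1) false).filter (fun p => p.1 == k)
    = ps.filter (fun p => p.1 == k) := by
  induction ps using List.reverseRecOn with
  | nil => rfl
  | append_singleton ps x ih =>
    have hstep : PySem.List.sorted (ps ++ [x]) (fun p => p.1) false
        = PySem.List.insertBy (fun a b => decide (a.1 < b.1)) x (PySem.List.sorted ps (fun p => p.1) false) := by
      rw [PySem.List.sorted_eq_foldl_insertBy, PySem.List.sorted_eq_foldl_insertBy, List.foldl_append]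
      rfl
    rw [hstep, filter_insertBy _ _ _ (PySem.List.sorted_pairwise ps (fun p => p.1)), ih,
      List.filter_append, List.filter_cons]
    by_cases hx : (x.1 == k) = true <;> simp [hx]

-- the grouping pass over a key-sorted pair list picks the first caption of each distinct key
theorem grp_spec (S : List (String × String)) (hS : S.Pairwise (fun a b => a.1 ≤ b.1)) :
    ∀ (prev : Option String), (∀ q ∈ S, ∀ c, prev = some c → c ≤ q.1) →
    pvGrp prev S
    = ((PySem.Set.ofList (S.map (·.1))).filter (fun k' => decide (prev ≠ some k'))).map (pvFirstCap S) := by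
  induction S with
  | nil => intro prev _; simp [pvGrp, PySem.Set.ofList]
  | cons q u ih =>
    rw [List.pairwise_cons] at hS
    intro prev hprev
    have hu := ih hS.2 (some q.1) (fun r hr c hc' => (Option.some.inj hc') ▸ hS.1 r hr)
    rw [List.map_cons, PySem.Set.ofList_cons]
    have hcapq : ∀ k', k' ≠ q.1 → pvFirstCap (q :: u) k' = pvFirstCap u k' := by
      intro k' hk'
      unfold pvFirstCap
      rw [List.filter_cons]
      simp [Ne.symm hk']
    by_cases h : prev = some q.1
    · -- skip: same image_id as the previous record
      subst h
      have hL : pvGrp (some q.1) (q :: u) = pvGrp (some q.1) u := by simp [pvGrp]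
      have h1 : (q.1 :: (PySem.Set.ofList (u.map (·.1))).discard q.1).filter
            (fun k' => decide ((some q.1 : Option String) ≠ some k'))
          = ((PySem.Set.ofList (u.map (·.1))).discard q.1).filter
            (fun k' => decide ((some q.1 : Option String) ≠ some k')) := by
        rw [List.filter_cons]; simp
      have h2 : ((PySem.Set.ofList (u.map (·.1))).discard q.1).filter
            (fun k' => decide ((some q.1 : Option String) ≠ some k'))
          = (PySem.Set.ofList (u.map (·.1))).filter
            (fun k' => decide ((some q.1 : Option String) ≠ some k')) := by
        unfold PySem.Set.discard
        rw [List.filter_filter]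
        apply List.filter_congr
        intro k' _
        by_cases hk : k' = q.1 <;> simp [hk]
      rw [hL, hu, h1, h2]
      apply List.map_congr_left
      intro k' hk'
      have hkne : k' ≠ q.1 := by
        have := List.of_mem_filter hk'
        simp only [decide_eq_true_eq] at this
        exact fun he => this (by rw [he])
      rw [hcapq k' hkne]
    · -- emit: first record of a new image_id run
      have hL : pvGrp prev (q :: u) = q.2 :: pvGrp (some q.1) u := by simp [pvGrp, h]
      have h1 : (q.1 :: (PySem.Set.ofList (u.map (·.1))).discard q.1).filter
            (fun k' => decide (prev ≠ some k'))
          = q.1 :: ((PySem.Set.ofList (u.map (·.1))).discard q.1).filter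
            (fun k' => decide (prev ≠ some k')) := by
        rw [List.filter_cons]; simp [h]
      have h2 : ((PySem.Set.ofList (u.map (·.1))).discard q.1).filter
            (fun k' => decide (prev ≠ some k'))
          = (PySem.Set.ofList (u.map (·.1))).filter
            (fun k' => decide ((some q.1 : Option String) ≠ some k')) := by
        unfold PySem.Set.discard
        rw [List.filter_filter]
        apply List.filter_congr
        intro k' hk'
        by_cases hk : k' = q.1
        · simp [hk]
        · have hne : prev ≠ some k' := by
            rcases prev with _ | c
            · exact fun he => nomatch he
            · intro he
              have hce : c = k' := Option.some.inj he
              have hcq : c ≤ q.1 := hprev q List.mem_cons_self c rfl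
              have hcne : c ≠ q.1 := fun hcq1 => h (by rw [hcq1])
              have hclt : c < q.1 := lt_of_le_of_ne hcq hcne
              rcases List.mem_map.mp ((PySem.Set.mem_ofList _ _).mp hk') with ⟨r, hr, hrk⟩
              have hqk : q.1 ≤ k' := hrk ▸ hS.1 r hr
              exact absurd hce (ne_of_lt (lt_of_lt_of_le hclt hqk))
          have hb : (k' == q.1) = false := beq_eq_false_iff_ne.mpr hk
          have hd : decide (q.1 = k') = false := decide_eq_false (fun he => hk he.symm)
          simp [hne, hb, hd]
      rw [hL, hu, h1, h2, List.map_cons]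
      congr 1
      · unfold pvFirstCap
        rw [List.filter_cons]
        simp
      · apply List.map_congr_left
        intro k' hk'
        have hkne : k' ≠ q.1 := by
          have := List.of_mem_filter hk'
          simp only [decide_eq_true_eq] at this
          exact fun he => this (by rw [he])
        rw [hcapq k' hkne]

-- the distinct keys of the sorted pair list are exactly sorted(set(keys))
theorem ofList_pairwise_lt_of_pairwise_le (l : List String) (h : l.Pairwise (fun a b => a ≤ b)) :
    (PySem.Set.ofList l).Pairwise (fun a b => a < b) := by
  induction l with
  | nil => simp [PySem.Set.ofList]
  | cons x l ih =>
    rw [List.pairwise_cons] at h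
    rw [PySem.Set.ofList_cons, List.pairwise_cons]
    constructor
    · intro y hy
      rcases (PySem.Set.mem_discard _ _ _).mp hy with ⟨hyl, hyx⟩
      exact lt_of_le_of_ne (h.1 y ((PySem.Set.mem_ofList _ _).mp hyl)) (Ne.symm hyx)
    · unfold PySem.Set.discard
      exact (ih h.2).sublist List.filter_sublist

theorem keys_sorted_eq (ps : List (String × String)) :
    PySem.List.sorted (PySem.Set.ofList (ps.map (·.1))) (fun k => k) false
    = PySem.Set.ofList ((PySem.List.sorted ps (fun p => p.1) false).map (·.1)) := by
  apply PySem.List.sorted_eq_of_perm_of_pairwise_lt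
  · rw [List.perm_ext_iff_of_nodup (PySem.Set.nodup_ofList _) (PySem.Set.nodup_ofList _)]
    intro a
    rw [PySem.Set.mem_ofList, PySem.Set.mem_ofList, List.mem_map, List.mem_map]
    constructor
    · rintro ⟨p, hp, hpk⟩; exact ⟨p, (PySem.List.mem_sorted _ _ _ _).mp hp, hpk⟩
    · rintro ⟨p, hp, hpk⟩; exact ⟨p, (PySem.List.mem_sorted _ _ _ _).mpr hp, hpk⟩
  · apply ofList_pairwise_lt_of_pairwise_le
    exact List.Pairwise.map _ (fun a b hab => hab) (PySem.List.sorted_pairwise ps (fun p => p.1))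

theorem B_eq (annotations : List (String × List (List (String × String)))) :
    extract_captions_alt annotations
    = (PySem.List.sorted (pvK ((List.lookup "annotations" annotations).getD [])) (fun k => k) false).map
        (pvF ((List.lookup "annotations" annotations).getD [])) := by
  simp only [extract_captions_alt]
  set recs := (List.lookup "annotations" annotations).getD [] with hrecs
  have hps : recs.map (fun ann => (aGetS ann "image_id", aGetS ann "caption")) = pvPairs recs := rfl
  rw [hps, foldl_grp, List.nil_append]
  set S := PySem.List.sorted (pvPairs recs) (fun p => p.1) false with hSdef
  have hsorted : S.Pairwise (fun a b => a.1 ≤ b.1) := PySem.List.sorted_pairwise (pvPairs recs) (fun p => p.1)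
  rw [grp_spec S hsorted none (fun q _ c hc => nomatch hc)]
  have htrue : (PySem.Set.ofList (S.map (·.1))).filter (fun k' => decide ((none : Option String) ≠ some k'))
      = PySem.Set.ofList (S.map (·.1)) := by
    apply List.filter_eq_self.mpr
    intro a _
    simp
  rw [htrue]
  have hkeys : PySem.List.sorted (pvK recs) (fun k => k) false = PySem.Set.ofList (S.map (·.1)) := by
    have : pvK recs = PySem.Set.ofList ((pvPairs recs).map (·.1)) := by
      unfold pvK pvPairs
      rw [List.map_map]
      rfl
    rw [this, keys_sorted_eq]
  rw [hkeys]
  apply List.map_congr_left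
  intro k _
  unfold pvF
  unfold pvFirstCap
  rw [hSdef, filter_sorted_key]

-- ===== VERDICT (by name: the statement is the Claim_ definition above) =====
theorem extract_captions_spec : Claim_equal_extract_captions := by
  intro annotations _ _
  unfold Spec_extract_captions
  rw [A_eq, B_eq]
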